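-- pv_equiv track=rewrite | github.com/mistvapour/6016b | backend/table_parser/prototype.py | detect_table_blocks
-- ===== SOURCE A (Python) =====
-- from typing import List, Dict
--
-- COMMON_COLS = [
--     "word", "bit", "start", "end", "field", "description", "units", "coding",
-- ]
--
-- def detect_table_blocks(text: str) -> List[str]:
--     blocks: List[str] = []
--     lines = text.splitlines()
--     window: List[str] = []
--     for line in lines:
--         window.append(line)
--         if len(window) > 30:
--             window.pop(0)
--         joined = "\n".join(window).lower()
--         if sum(1 for c in COMMON_COLS if c in joined) >= 3:
--             blocks.append(joined)
--             window = []
--     return blocks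
-- ===== SOURCE B (Python) =====
-- from typing import List
--
-- COMMON_COLS = [
--     "word", "bit", "start", "end", "field", "description", "units", "coding",
-- ]
--
-- def detect_table_blocks(text: str) -> List[str]:
--     # Lowercase and keyword-scan each line ONCE; carry (lowered line, keyword set)
--     # pairs in the window and test the union of the per-line sets, joining only
--     # when a block is emitted -- instead of re-joining, re-lowering and
--     # re-scanning the whole window on every line.
--     blocks: List[str] = []
--     window: List[tuple] = []  # (lowered line, set of COMMON_COLS present in it)
--     for line in text.splitlines():
--         low = line.lower()
--         window.append((low, {c for c in COMMON_COLS if c in low}))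
--         if len(window) > 30:
--             window.pop(0)
--         present = set()
--         for _, kws in window:
--             present |= kws
--         if len(present) >= 3:
--             blocks.append("\n".join(low for low, _ in window))
--             window = []
--     return blocks
-- ===== Notes on version B (the rewrite author's own statement) =====
-- stated objective: alternative
-- what changed: Instead of re-joining, re-lowercasing and re-scanning the whole 30-line window for all 8 keywords on every input line, B lowercases and keyword-scans each line exactly once, keeps a per-line keyword set alongside each window line, tests the size of the union of those sets, and builds the joined lowered block only when it is emitted.
import Mathlib
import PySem

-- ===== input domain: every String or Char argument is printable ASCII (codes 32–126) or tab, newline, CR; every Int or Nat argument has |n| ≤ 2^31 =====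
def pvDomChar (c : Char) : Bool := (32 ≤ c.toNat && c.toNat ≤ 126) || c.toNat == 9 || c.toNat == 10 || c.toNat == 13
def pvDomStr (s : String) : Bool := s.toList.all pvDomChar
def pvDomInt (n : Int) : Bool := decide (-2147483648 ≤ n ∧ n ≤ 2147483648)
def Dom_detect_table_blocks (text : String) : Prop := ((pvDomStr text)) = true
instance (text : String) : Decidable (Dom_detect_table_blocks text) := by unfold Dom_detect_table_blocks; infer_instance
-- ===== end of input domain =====

-- B lowercases and keyword-scans each line once and keeps per-line keyword sets in
-- the window (testing the union's size, joining only on emission) instead of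
-- re-joining, re-lowering and re-scanning the whole window on every line.

-- ===== PORT A =====
def pvCOMMON_COLS : List String :=
  ["word", "bit", "start", "end", "field", "description", "units", "coding"]

-- one iteration of A's for-loop; state = (blocks, window)
def pvStepA (st : List String × List String) (line : String) : List String × List String :=
  let window0 := st.2 ++ [line]                                        -- window.append(line)
  let window1 := if 30 < window0.length then window0.drop 1 else window0  -- window.pop(0)
  let joined := PySem.Str.lower (PySem.Str.join "\n" window1)
  -- sum(1 for c in COMMON_COLS if c in joined) is the count of matching keywords
  if 3 ≤ pvCOMMON_COLS.countP (fun c => PySem.Str.isIn c joined) then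
    (st.1 ++ [joined], [])                                             -- blocks.append; window = []
  else (st.1, window1)

def detect_table_blocks (text : String) : List String :=
  ((PySem.Str.splitlines text).foldl pvStepA ([], [])).1

-- ===== PORT B =====
-- {c for c in COMMON_COLS if c in low} : the set of keywords present in one lowered line
def pvLineKws (low : String) : PySem.Set String :=
  PySem.Set.ofList (pvCOMMON_COLS.filter (fun c => PySem.Str.isIn c low))

-- one iteration of B's for-loop; state = (blocks, window of (lowered line, keyword set))
def pvStepB (st : List String × List (String × PySem.Set String)) (line : String) :
    List String × List (String × PySem.Set String) :=
  let low := PySem.Str.lower line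
  let window0 := st.2 ++ [(low, pvLineKws low)]                        -- window.append((low, kws))
  let window1 := if 30 < window0.length then window0.drop 1 else window0  -- window.pop(0)
  let present := window1.foldl (fun s p => PySem.Set.union s p.2) PySem.Set.empty  -- present |= kws
  if 3 ≤ PySem.Set.len present then
    (st.1 ++ [PySem.Str.join "\n" (window1.map Prod.fst)], [])
  else (st.1, window1)

def detect_table_blocks_alt (text : String) : List String :=
  ((PySem.Str.splitlines text).foldl pvStepB ([], [])).1

-- ===== PRECONDITION & SPEC =====
def Spec_detect_table_blocks (text : String) (out : List String) : Prop := out = detect_table_blocks_alt text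
instance (text : String) (out : List String) : Decidable (Spec_detect_table_blocks text out) := by unfold Spec_detect_table_blocks; infer_instance

-- ===== CLAIM (what is proved, stated in full; the proofs are below) =====
def Claim_equal_detect_table_blocks : Prop := ∀ (text : String), Dom_detect_table_blocks text → Spec_detect_table_blocks text (detect_table_blocks text)

-- ===== LEMMAS AND PROOFS =====

-- B's window entry corresponding to A's window line
def pvTag (l : String) : String × PySem.Set String :=
  (PySem.Str.lower l, pvLineKws (PySem.Str.lower l))

-- a prefix that avoids '\n' cannot reach past the '\n'
lemma pv_prefix_of_append_cons (sub as r : List Char) (hnl : '\n' ∉ sub) :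
    sub <+: (as ++ '\n' :: r) → sub <+: as := by
  induction sub generalizing as with
  | nil => intro _; exact List.nil_prefix
  | cons c cs ih =>
      intro h
      cases as with
      | nil =>
          simp only [List.nil_append, List.cons_prefix_cons] at h
          exact absurd (h.1 ▸ List.mem_cons_self) hnl
      | cons a as' =>
          simp only [List.cons_append, List.cons_prefix_cons] at h ⊢
          exact ⟨h.1, ih as' (fun hm => hnl (List.mem_cons_of_mem _ hm)) h.2⟩

-- an occurrence of a '\n'-free pattern lies wholly on one side of a '\n'
lemma pv_infix_append_cons_iff (sub p r : List Char) (hne : sub ≠ []) (hnl : '\n' ∉ sub) :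
    sub <:+: (p ++ '\n' :: r) ↔ (sub <:+: p ∨ sub <:+: r) := by
  induction p with
  | nil =>
      simp only [List.nil_append, List.infix_cons_iff]
      constructor
      · rintro (h | h)
        · cases sub with
          | nil => exact absurd rfl hne
          | cons c cs =>
              rw [List.cons_prefix_cons] at h
              exact absurd (h.1 ▸ List.mem_cons_self) hnl
        · exact Or.inr h
      · rintro (h | h)
        · rw [List.infix_nil] at h; exact absurd h hne
        · exact Or.inr h
  | cons a p' ih =>
      simp only [List.cons_append, List.infix_cons_iff, ih]
      have h1 : sub <+: (a :: (p' ++ '\n' :: r)) ↔ sub <+: (a :: p') := by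
        constructor
        · intro h
          exact pv_prefix_of_append_cons sub (a :: p') r hnl (by simpa using h)
        · intro h
          exact h.trans (List.cons_prefix_cons.mpr ⟨rfl, List.prefix_append _ _⟩)
      rw [h1]
      tauto

-- membership in a '\n'-join is membership in some part
lemma pv_isIn_join (sub : List Char) (hne : sub ≠ []) (hnl : '\n' ∉ sub) (parts : List (List Char)) :
    PySem.Chars.isIn sub (PySem.Chars.join ['\n'] parts)
      = parts.any (fun p => PySem.Chars.isIn sub p) := by
  induction parts with
  | nil =>
      rw [PySem.Chars.join_nil, List.any_nil, PySem.Chars.isIn_eq_false_iff, List.infix_nil]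
      exact hne
  | cons p rest ih =>
      cases rest with
      | nil => rw [PySem.Chars.join_singleton]; simp
      | cons q rest' =>
          rw [PySem.Chars.join_cons_cons, List.any_cons, ← ih]
          have hsplit := pv_infix_append_cons_iff sub p
            (PySem.Chars.join ['\n'] (q :: rest')) hne hnl
          rw [List.append_assoc, List.singleton_append]
          rcases h1 : PySem.Chars.isIn sub (p ++ '\n' :: PySem.Chars.join ['\n'] (q :: rest')) with _ | _
          · rw [PySem.Chars.isIn_eq_false_iff] at h1
            rw [hsplit] at h1
            rw [not_or] at h1
            rw [eq_comm, Bool.or_eq_false_iff, PySem.Chars.isIn_eq_false_iff,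
              PySem.Chars.isIn_eq_false_iff]
            exact ⟨h1.1, h1.2⟩
          · rw [PySem.Chars.isIn_iff_infix, hsplit] at h1
            rw [eq_comm, Bool.or_eq_true]
            rcases h1 with h | h
            · exact Or.inl ((PySem.Chars.isIn_iff_infix _ _).mpr h)
            · exact Or.inr ((PySem.Chars.isIn_iff_infix _ _).mpr h)

-- lower maps through a '\n'-join (character level)
lemma pv_chars_lower_join (parts : List (List Char)) :
    PySem.Chars.lower (PySem.Chars.join ['\n'] parts)
      = PySem.Chars.join ['\n'] (parts.map PySem.Chars.lower) := by
  induction parts with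
  | nil => rfl
  | cons p rest ih =>
      cases rest with
      | nil => rw [PySem.Chars.join_singleton, List.map_cons, List.map_nil, PySem.Chars.join_singleton]
      | cons q rest' =>
          have ih' : PySem.Chars.lower (PySem.Chars.join ['\n'] (q :: rest'))
              = PySem.Chars.join ['\n'] (PySem.Chars.lower q :: rest'.map PySem.Chars.lower) := by
            simpa using ih
          rw [PySem.Chars.join_cons_cons, List.map_cons, List.map_cons, PySem.Chars.join_cons_cons,
            ← ih']
          simp [PySem.Chars.lower, PySem.Chars.lowerChar]
          decide

-- lower maps through a '\n'-join
lemma pv_lower_join (ws : List String) :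
    PySem.Str.lower (PySem.Str.join "\n" ws) = PySem.Str.join "\n" (ws.map PySem.Str.lower) := by
  apply String.toList_inj.mp
  rw [PySem.Str.toList_lower, PySem.Str.toList_join, PySem.Str.toList_join]
  have h1 : "\n".toList = ['\n'] := rfl
  rw [h1, pv_chars_lower_join]
  congr 1
  simp [List.map_map, Function.comp, PySem.Str.toList_lower]

-- membership in B's running union
lemma pv_mem_present (ws : List (String × PySem.Set String)) (s0 : PySem.Set String) (c : String) :
    c ∈ ws.foldl (fun s p => PySem.Set.union s p.2) s0 ↔ c ∈ s0 ∨ ∃ p ∈ ws, c ∈ p.2 := by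
  induction ws generalizing s0 with
  | nil => simp
  | cons p rest ih =>
      simp only [List.foldl_cons, ih, PySem.Set.mem_union, List.exists_mem_cons_iff]
      tauto

lemma pv_nodup_present (ws : List (String × PySem.Set String)) (s0 : PySem.Set String)
    (h : s0.Nodup) : (ws.foldl (fun s p => PySem.Set.union s p.2) s0).Nodup := by
  induction ws generalizing s0 with
  | nil => exact h
  | cons p rest ih => exact ih _ (PySem.Set.nodup_union _ _ h)

-- a keyword is in the lowered join iff it is in some lowered line
lemma pv_keyword_in_joined (c : String) (hc : c ∈ pvCOMMON_COLS) (ws : List String) :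
    PySem.Str.isIn c (PySem.Str.lower (PySem.Str.join "\n" ws))
      = ws.any (fun x => PySem.Str.isIn c (PySem.Str.lower x)) := by
  have hprop : c.toList ≠ [] ∧ '\n' ∉ c.toList := by fin_cases hc <;> decide
  rw [pv_lower_join, PySem.Str.isIn_eq, PySem.Str.toList_join,
    show "\n".toList = ['\n'] from rfl, pv_isIn_join c.toList hprop.1 hprop.2]
  simp [List.any_map, Function.comp_def, PySem.Str.isIn_eq, PySem.Str.toList_lower]

-- B's union-size test equals A's count over the joined window
lemma pv_cond_eq (w1 : List String) :
    (3 ≤ PySem.Set.len ((w1.map pvTag).foldl (fun s p => PySem.Set.union s p.2) PySem.Set.empty))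
      ↔ (3 ≤ pvCOMMON_COLS.countP
            (fun c => PySem.Str.isIn c (PySem.Str.lower (PySem.Str.join "\n" w1)))) := by
  have hcount : pvCOMMON_COLS.countP
      (fun c => PySem.Str.isIn c (PySem.Str.lower (PySem.Str.join "\n" w1)))
      = pvCOMMON_COLS.countP (fun c => w1.any (fun x => PySem.Str.isIn c (PySem.Str.lower x))) :=
    List.countP_congr (fun c hcm => by rw [pv_keyword_in_joined c hcm w1])
  have hU : ((w1.map pvTag).foldl (fun s p => PySem.Set.union s p.2) PySem.Set.empty).Nodup :=
    pv_nodup_present _ _ List.nodup_nil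
  have hF : (pvCOMMON_COLS.filter
      (fun c => w1.any (fun x => PySem.Str.isIn c (PySem.Str.lower x)))).Nodup :=
    (by decide : pvCOMMON_COLS.Nodup).filter _
  have hlen : ((w1.map pvTag).foldl (fun s p => PySem.Set.union s p.2) PySem.Set.empty).length
      = (pvCOMMON_COLS.filter
          (fun c => w1.any (fun x => PySem.Str.isIn c (PySem.Str.lower x)))).length := by
    rw [← List.toFinset_card_of_nodup hU, ← List.toFinset_card_of_nodup hF]
    congr 1
    ext c
    simp only [List.mem_toFinset, pv_mem_present, List.mem_filter, List.any_eq_true]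
    constructor
    · rintro (h | ⟨p, hp, hcp⟩)
      · simp at h
      · rcases List.mem_map.mp hp with ⟨x, hx, rfl⟩
        simp only [pvTag, pvLineKws, PySem.Set.mem_ofList, List.mem_filter] at hcp
        exact ⟨hcp.1, x, hx, hcp.2⟩
    · rintro ⟨hcm, x, hx, hcx⟩
      refine Or.inr ⟨pvTag x, List.mem_map_of_mem hx, ?_⟩
      simp only [pvTag, pvLineKws, PySem.Set.mem_ofList, List.mem_filter]
      exact ⟨hcm, hcx⟩
  rw [hcount, List.countP_eq_length_filter]
  unfold PySem.Set.len
  rw [hlen]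
  exact_mod_cast Iff.rfl

-- B's emitted string equals A's
lemma pv_emit_eq (w1 : List String) :
    PySem.Str.join "\n" ((w1.map pvTag).map Prod.fst)
      = PySem.Str.lower (PySem.Str.join "\n" w1) := by
  rw [pv_lower_join, List.map_map]
  rfl

-- one loop iteration of B simulates one iteration of A
lemma pv_step_sim (bl : List String) (w : List String) (l : String) :
    pvStepB (bl, w.map pvTag) l = ((pvStepA (bl, w) l).1, (pvStepA (bl, w) l).2.map pvTag) := by
  simp only [pvStepA, pvStepB]
  have hmap : List.map pvTag w ++ [(PySem.Str.lower l, pvLineKws (PySem.Str.lower l))]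
      = (w ++ [l]).map pvTag := by simp [pvTag]
  rw [hmap, List.length_map]
  have hW : (if 30 < (w ++ [l]).length then ((w ++ [l]).map pvTag).drop 1 else (w ++ [l]).map pvTag)
      = (if 30 < (w ++ [l]).length then (w ++ [l]).drop 1 else (w ++ [l])).map pvTag := by
    split <;> simp
  rw [hW]
  set w1 := if 30 < (w ++ [l]).length then (w ++ [l]).drop 1 else (w ++ [l]) with hw1
  by_cases hc : 3 ≤ pvCOMMON_COLS.countP
      (fun c => PySem.Str.isIn c (PySem.Str.lower (PySem.Str.join "\n" w1)))
  · rw [if_pos hc, if_pos ((pv_cond_eq w1).mpr hc)]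
    rw [pv_emit_eq w1]
    simp
  · rw [if_neg hc, if_neg (fun h => hc ((pv_cond_eq w1).mp h))]

-- the whole loop of B simulates the whole loop of A
lemma pv_foldl_sim (lines : List String) (bl : List String) (w : List String) :
    lines.foldl pvStepB (bl, w.map pvTag)
      = ((lines.foldl pvStepA (bl, w)).1, (lines.foldl pvStepA (bl, w)).2.map pvTag) := by
  induction lines generalizing bl w with
  | nil => rfl
  | cons l rest ih =>
      simp only [List.foldl_cons, pv_step_sim]
      rw [ih (pvStepA (bl, w) l).1 (pvStepA (bl, w) l).2, Prod.mk.eta]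

-- ===== VERDICT (by name: the statement is the Claim_ definition above) =====
theorem detect_table_blocks_spec : Claim_equal_detect_table_blocks := by
  intro text _
  show detect_table_blocks text = detect_table_blocks_alt text
  unfold detect_table_blocks detect_table_blocks_alt
  rw [show ([] : List (String × PySem.Set String)) = List.map pvTag [] from rfl, pv_foldl_sim]
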